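-- pv_equiv track=rewrite | github.com/ChantalMP/FoobarChallenge | challenge_3_3.py | solution
-- ===== SOURCE A (Python) =====
-- def solution(x,y):
--     x = int(x)
--     y = int(y)
--     cycles = 0
--     while True:
--         if x == 1 and y == 1:
--             return str(cycles)
--         elif x < 1 or y < 1:
--             return 'impossible'
--         if x < y:
--             steps = y//x
--             if x == 1:
--                 steps-=1
--             y = y - steps*x
--             cycles += steps
--         else:
--             steps = x // y
--             if y == 1:
--                 steps-=1
--             x = x - steps * y
--             cycles += steps
-- ===== SOURCE B (Python) =====
-- def solution(x, y):
--     x = int(x)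
--     y = int(y)
--     if x < 1 or y < 1:
--         return 'impossible'
--     count = 0
--     while x > 0 and y > 0:
--         if x < y:
--             x, y = y, x
--         d, s = y, 1
--         while d * 2 <= x:
--             d *= 2
--             s *= 2
--         x -= d
--         count += s
--     if x + y == 1:
--         return str(count - 1)
--     return 'impossible'
-- ===== Notes on version B (the rewrite author's own statement) =====
-- stated objective: alternative
-- what changed: Replaces A's division-based descent (quotients via // with per-branch steps-=1 corrections) by a division-free shift-and-subtract algorithm: repeatedly subtract the largest power-of-two multiple of the smaller coordinate (found by a doubling inner loop), counting the multiples, until one coordinate is zero, then one closed-form -1 adjustment.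
import Mathlib
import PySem

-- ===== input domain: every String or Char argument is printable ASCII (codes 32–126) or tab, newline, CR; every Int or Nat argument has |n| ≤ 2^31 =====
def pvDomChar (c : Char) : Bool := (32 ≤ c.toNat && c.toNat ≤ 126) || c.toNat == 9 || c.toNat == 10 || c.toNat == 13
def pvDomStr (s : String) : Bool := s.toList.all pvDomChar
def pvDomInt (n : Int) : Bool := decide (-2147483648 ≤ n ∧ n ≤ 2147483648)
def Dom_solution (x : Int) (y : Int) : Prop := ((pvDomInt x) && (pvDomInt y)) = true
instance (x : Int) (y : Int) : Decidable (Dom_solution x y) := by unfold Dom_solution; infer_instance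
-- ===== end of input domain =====

-- B replaces A's division-based descent by a division-free shift-and-subtract
-- (doubling) algorithm with one closed-form -1 adjustment (objective: alternative).

-- ===== PORT A =====
-- A's 'while True' loop. The Nat argument is a fuel guard only: x + y strictly decreases
-- while the loop continues, so fuel (x+y).toNat + 1 is never exhausted (main_lemma below).
def solutionLoop : Nat → Int → Int → Int → String
  | 0, _, _, _ => "impossible"
  | fuel + 1, x, y, cycles =>
    if x = 1 ∧ y = 1 then PySem.Int.toStr cycles
    else if x < 1 ∨ y < 1 then "impossible"
    else if x < y then
      let steps := if x = 1 then PySem.Int.floordiv y x - 1 else PySem.Int.floordiv y x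
      solutionLoop fuel x (y - steps * x) (cycles + steps)
    else
      let steps := if y = 1 then PySem.Int.floordiv x y - 1 else PySem.Int.floordiv x y
      solutionLoop fuel (x - steps * y) y (cycles + steps)

def solution (x : Int) (y : Int) : String :=
  solutionLoop ((x + y).toNat + 1) x y 0

-- ===== PORT B =====
-- B's inner 'while d*2 <= x' doubling loop; returns the final (d, s).
-- Fuel guard only: d at least doubles each step, so x.toNat + 1 suffices.
def dblLoop : Nat → Int → Int → Int → Int × Int
  | 0, _, d, s => (d, s)
  | fuel + 1, x, d, s =>
    if d * 2 ≤ x then dblLoop fuel x (d * 2) (s * 2) else (d, s)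

-- B's outer 'while x > 0 and y > 0' loop; returns the final (x, y, count).
-- Fuel guard only: x + y strictly decreases each iteration, so (x+y).toNat + 1 suffices.
def outerLoop : Nat → Int → Int → Int → Int × Int × Int
  | 0, x, y, c => (x, y, c)
  | fuel + 1, x, y, c =>
    if 0 < x ∧ 0 < y then
      let xy := if x < y then (y, x) else (x, y)
      let ds := dblLoop (xy.1.toNat + 1) xy.1 xy.2 1
      outerLoop fuel (xy.1 - ds.1) xy.2 (c + ds.2)
    else (x, y, c)

def solution_alt (x : Int) (y : Int) : String :=
  if x < 1 ∨ y < 1 then "impossible"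
  else
    let r := outerLoop ((x + y).toNat + 1) x y 0
    if r.1 + r.2.1 = 1 then PySem.Int.toStr (r.2.2 - 1) else "impossible"

-- ===== PRECONDITION & SPEC =====
def Spec_solution (x : Int) (y : Int) (out : String) : Prop := out = solution_alt x y
instance (x : Int) (y : Int) (out : String) : Decidable (Spec_solution x y out) := by unfold Spec_solution; infer_instance

-- ===== CLAIM (what is proved, stated in full; the proofs are below) =====
def Claim_equal_solution : Prop := ∀ (x : Int) (y : Int), Dom_solution x y → Spec_solution x y (solution x y)

-- ===== LEMMAS AND PROOFS =====

-- proof-only reference: the plain Euclidean quotient-sum loop both ports are compared to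
def euclidLoop : Nat → Int → Int → Int → Int × Int
  | 0, a, _, count => (a, count)
  | fuel + 1, a, b, count =>
    if 0 < b then euclidLoop fuel b (PySem.Int.mod a b) (count + PySem.Int.floordiv a b)
    else (a, count)

-- region of (x, y) preserved by the induction of main_lemma
def EuH (x : Int) (y : Int) : Prop := (1 ≤ x ∧ 1 ≤ y) ∨ (2 ≤ x ∧ 0 ≤ y) ∨ (0 ≤ x ∧ 2 ≤ y)

theorem euclid_zero (e : Nat) (a c : Int) : euclidLoop e a 0 c = (a, c) := by
  cases e <;> simp [euclidLoop]

theorem euclid_step (e : Nat) (a b c : Int) (h : 0 < b) :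
    euclidLoop (e + 1) a b c =
      euclidLoop e b (PySem.Int.mod a b) (c + PySem.Int.floordiv a b) := by
  simp only [euclidLoop, if_pos h]

theorem euclid_base (e : Nat) (a b c : Int) (h : ¬ 0 < b) :
    euclidLoop (e + 1) a b c = (a, c) := by
  simp only [euclidLoop, if_neg h]

theorem sol_ret (f : Nat) (x y c : Int) (h : x = 1 ∧ y = 1) :
    solutionLoop (f + 1) x y c = PySem.Int.toStr c := by
  simp only [solutionLoop, if_pos h]

theorem sol_imp (f : Nat) (x y c : Int) (h11 : ¬ (x = 1 ∧ y = 1)) (hz : x < 1 ∨ y < 1) :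
    solutionLoop (f + 1) x y c = "impossible" := by
  simp only [solutionLoop, if_neg h11, if_pos hz]

theorem sol_step_lt (f : Nat) (x y c : Int) (h11 : ¬ (x = 1 ∧ y = 1))
    (hz : ¬ (x < 1 ∨ y < 1)) (hxy : x < y) :
    solutionLoop (f + 1) x y c =
      solutionLoop f x
        (y - (if x = 1 then PySem.Int.floordiv y x - 1 else PySem.Int.floordiv y x) * x)
        (c + (if x = 1 then PySem.Int.floordiv y x - 1 else PySem.Int.floordiv y x)) := by
  simp only [solutionLoop, if_neg h11, if_neg hz, if_pos hxy]

theorem sol_step_ge (f : Nat) (x y c : Int) (h11 : ¬ (x = 1 ∧ y = 1))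
    (hz : ¬ (x < 1 ∨ y < 1)) (hxy : ¬ x < y) :
    solutionLoop (f + 1) x y c =
      solutionLoop f
        (x - (if y = 1 then PySem.Int.floordiv x y - 1 else PySem.Int.floordiv x y) * y) y
        (c + (if y = 1 then PySem.Int.floordiv x y - 1 else PySem.Int.floordiv x y)) := by
  simp only [solutionLoop, if_neg h11, if_neg hz, if_neg hxy]

theorem mod_small {a b : Int} (h0 : 0 ≤ a) (h1 : a < b) : PySem.Int.mod a b = a := by
  rw [PySem.Int.mod_eq_emod_of_pos (by omega)]
  exact Int.emod_eq_of_lt h0 h1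

theorem fd_small {a b : Int} (h0 : 0 ≤ a) (h1 : a < b) : PySem.Int.floordiv a b = 0 := by
  rw [PySem.Int.floordiv_eq_ediv_of_pos (by omega)]
  exact Int.ediv_eq_zero_of_lt h0 h1

theorem fd_one (a : Int) : PySem.Int.floordiv a 1 = a := by
  rw [PySem.Int.floordiv_eq_ediv_of_pos one_pos]; exact Int.ediv_one a

theorem mod_one (a : Int) : PySem.Int.mod a 1 = 0 := by
  rw [PySem.Int.mod_eq_emod_of_pos one_pos]; exact Int.emod_one a

-- the count parameter of euclidLoop is a pure accumulator
theorem euclid_shift : ∀ (e : Nat) (a b c d : Int),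
    euclidLoop e a b (c + d) = ((euclidLoop e a b c).1, (euclidLoop e a b c).2 + d) := by
  intro e
  induction e with
  | zero => intro a b c d; simp [euclidLoop]
  | succ e ih =>
    intro a b c d
    by_cases h : 0 < b
    · rw [euclid_step e a b (c + d) h, euclid_step e a b c h]
      rw [show c + d + PySem.Int.floordiv a b = (c + PySem.Int.floordiv a b) + d by ring]
      exact ih b (PySem.Int.mod a b) (c + PySem.Int.floordiv a b) d
    · rw [euclid_base e a b (c + d) h, euclid_base e a b c h]

-- euclidLoop ignores the fuel once it exceeds the number of iterations
theorem euclid_irrel : ∀ (n m : Nat) (a b c : Int), b.toNat < n → b.toNat < m →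
    euclidLoop n a b c = euclidLoop m a b c := by
  intro n
  induction n with
  | zero => intro m a b c hn _; omega
  | succ n ih =>
    intro m a b c hn hm
    obtain ⟨m', rfl⟩ : ∃ m', m = m' + 1 := ⟨m - 1, by omega⟩
    by_cases h : 0 < b
    · rw [euclid_step n a b c h, euclid_step m' a b c h]
      have h2 := PySem.Int.mod_nonneg a h
      have h3 := PySem.Int.mod_lt a h
      exact ih m' b (PySem.Int.mod a b) (c + PySem.Int.floordiv a b) (by omega) (by omega)
    · rw [euclid_base n a b c h, euclid_base m' a b c h]

-- euclidLoop is symmetric in its two Int state arguments (for 0 ≤ a, 0 < b)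
theorem euclid_symm (n m : Nat) (a b c : Int) (ha : 0 ≤ a) (hb : 0 < b)
    (hn : b.toNat < n) (hm : a.toNat < m) :
    euclidLoop n a b c = euclidLoop m b a c := by
  obtain ⟨n', rfl⟩ : ∃ n', n = n' + 1 := ⟨n - 1, by omega⟩
  rcases lt_trichotomy a b with h | h | h
  · rw [euclid_step n' a b c hb, mod_small ha h, fd_small ha h, add_zero]
    exact euclid_irrel n' m b a c (by omega) hm
  · subst h
    obtain ⟨m', rfl⟩ : ∃ m', m = m' + 1 := ⟨m - 1, by omega⟩
    rw [euclid_step n' a a c hb, euclid_step m' a a c hb]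
    rw [PySem.Int.mod_eq_emod_of_pos hb, Int.emod_self]
    rw [euclid_zero, euclid_zero]
  · obtain ⟨m', rfl⟩ : ∃ m', m = m' + 1 := ⟨m - 1, by omega⟩
    rw [euclid_step m' b a c (by omega), mod_small (by omega) h, fd_small (by omega) h,
      add_zero]
    exact euclid_irrel (n' + 1) m' a b c hn (by omega)

-- main invariant: on the preserved region EuH, A's loop equals the post-processed Euclid
theorem main_lemma : ∀ (n fuel efuel : Nat) (x y c : Int), (x + y).toNat ≤ n →
    (x + y).toNat < fuel → y.toNat < efuel → EuH x y →
    solutionLoop fuel x y c =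
      (if (euclidLoop efuel x y 0).1 = 1
       then PySem.Int.toStr (c + (euclidLoop efuel x y 0).2 - 1)
       else "impossible") := by
  intro n
  induction n with
  | zero => intro fuel efuel x y c hn _ _ hH; exfalso; unfold EuH at hH; omega
  | succ n ih =>
    intro fuel efuel x y c hn hf he hH
    have hH' := hH
    unfold EuH at hH'
    obtain ⟨f, rfl⟩ : ∃ f, fuel = f + 1 := ⟨fuel - 1, by omega⟩
    obtain ⟨e, rfl⟩ : ∃ e, efuel = e + 1 := ⟨efuel - 1, by omega⟩
    by_cases h11 : x = 1 ∧ y = 1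
    · obtain ⟨hx, hy⟩ := h11; subst hx; subst hy
      rw [sol_ret f 1 1 c ⟨rfl, rfl⟩]
      rw [euclid_step e 1 1 0 one_pos, mod_one, fd_one, euclid_zero]
      rw [if_pos (show ((1 : Int), (0 : Int) + 1).1 = 1 from rfl)]
      congr 1; omega
    · by_cases hz : x < 1 ∨ y < 1
      · rw [sol_imp f x y c h11 hz]
        rcases (show (x = 0 ∧ 2 ≤ y) ∨ (y = 0 ∧ 2 ≤ x) by omega) with
          ⟨hx0, hy2⟩ | ⟨hy0, hx2⟩
        · subst hx0
          rw [euclid_step e 0 y 0 (by omega), mod_small le_rfl (by omega),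
            fd_small le_rfl (by omega), euclid_zero]
          rw [if_neg (show ¬ ((y : Int), (0 : Int) + 0).1 = 1 by simp; omega)]
        · subst hy0
          rw [euclid_zero]
          rw [if_neg (show ¬ ((x : Int), (0 : Int)).1 = 1 by simp; omega)]
      · have hx1le : 1 ≤ x := by omega
        have hy1le : 1 ≤ y := by omega
        by_cases hxy : x < y
        · rw [sol_step_lt f x y c h11 hz hxy]
          by_cases hx1 : x = 1
          · subst hx1
            have hy2 : 2 ≤ y := by omega
            rw [if_pos (show (1 : Int) = 1 from rfl), fd_one]
            rw [show y - (y - 1) * 1 = 1 by ring]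
            obtain ⟨f', rfl⟩ : ∃ f', f = f' + 1 := ⟨f - 1, by omega⟩
            rw [sol_ret f' 1 1 _ ⟨rfl, rfl⟩]
            obtain ⟨e', rfl⟩ : ∃ e', e = e' + 1 := ⟨e - 1, by omega⟩
            rw [euclid_step (e' + 1) 1 y 0 (by omega), mod_small (by omega) (by omega),
              fd_small (by omega) (by omega)]
            rw [euclid_step e' y 1 (0 + 0) one_pos, mod_one, fd_one, euclid_zero]
            rw [if_pos (show ((1 : Int), (0 : Int) + 0 + y).1 = 1 from rfl)]
            congr 1; omega
          · rw [if_neg hx1]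
            have hxpos : (0 : Int) < x := by omega
            have hm0 := PySem.Int.mod_nonneg y hxpos
            have hmx := PySem.Int.mod_lt y hxpos
            have h4 := PySem.Int.floordiv_mul_add_mod y x
            rw [show y - PySem.Int.floordiv y x * x = PySem.Int.mod y x by omega]
            rw [ih f ((PySem.Int.mod y x).toNat + 1) x (PySem.Int.mod y x)
              (c + PySem.Int.floordiv y x) (by omega) (by omega) (by omega)
              (Or.inr (Or.inl ⟨by omega, hm0⟩))]
            rw [euclid_step e x y 0 (by omega), mod_small (by omega) hxy,
              fd_small (by omega) hxy]
            obtain ⟨e', rfl⟩ : ∃ e', e = e' + 1 := ⟨e - 1, by omega⟩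
            rw [euclid_step e' y x (0 + 0) hxpos]
            rw [show (0 : Int) + 0 + PySem.Int.floordiv y x = 0 + PySem.Int.floordiv y x
              by ring]
            rw [euclid_shift e' x (PySem.Int.mod y x) 0 (PySem.Int.floordiv y x)]
            rw [euclid_irrel e' ((PySem.Int.mod y x).toNat + 1) x (PySem.Int.mod y x) 0
              (by omega) (by omega)]
            by_cases hg : (euclidLoop ((PySem.Int.mod y x).toNat + 1) x (PySem.Int.mod y x) 0).1 = 1
            · rw [if_pos hg, if_pos hg]
              congr 1; omega
            · rw [if_neg hg, if_neg hg]
        · rw [sol_step_ge f x y c h11 hz hxy]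
          by_cases hy1 : y = 1
          · subst hy1
            have hx2 : 2 ≤ x := by omega
            rw [if_pos (show (1 : Int) = 1 from rfl), fd_one]
            rw [show x - (x - 1) * 1 = 1 by ring]
            obtain ⟨f', rfl⟩ : ∃ f', f = f' + 1 := ⟨f - 1, by omega⟩
            rw [sol_ret f' 1 1 _ ⟨rfl, rfl⟩]
            rw [euclid_step e x 1 0 one_pos, mod_one, fd_one, euclid_zero]
            rw [if_pos (show ((1 : Int), (0 : Int) + x).1 = 1 from rfl)]
            congr 1; omega
          · rw [if_neg hy1]
            have hypos : (0 : Int) < y := by omega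
            have hm0 := PySem.Int.mod_nonneg x hypos
            have hmy := PySem.Int.mod_lt x hypos
            have h4 := PySem.Int.floordiv_mul_add_mod x y
            rw [show x - PySem.Int.floordiv x y * y = PySem.Int.mod x y by omega]
            rw [ih f (y.toNat + 1) (PySem.Int.mod x y) y (c + PySem.Int.floordiv x y)
              (by omega) (by omega) (by omega) (Or.inr (Or.inr ⟨hm0, by omega⟩))]
            rw [euclid_symm (y.toNat + 1) ((PySem.Int.mod x y).toNat + 1)
              (PySem.Int.mod x y) y 0 hm0 hypos (by omega) (by omega)]
            rw [euclid_step e x y 0 hypos]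
            rw [euclid_shift e y (PySem.Int.mod x y) 0 (PySem.Int.floordiv x y)]
            rw [euclid_irrel e ((PySem.Int.mod x y).toNat + 1) y (PySem.Int.mod x y) 0
              (by omega) (by omega)]
            by_cases hg : (euclidLoop ((PySem.Int.mod x y).toNat + 1) y (PySem.Int.mod x y) 0).1 = 1
            · rw [if_pos hg, if_pos hg]
              congr 1; omega
            · rw [if_neg hg, if_neg hg]

-- dblLoop preserves d = s*y and d ≤ x, and never shrinks s
theorem dbl_inv : ∀ (f : Nat) (x d s y : Int), d = s * y → d ≤ x → 1 ≤ s →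
    (dblLoop f x d s).1 = (dblLoop f x d s).2 * y ∧
    (dblLoop f x d s).1 ≤ x ∧ 1 ≤ (dblLoop f x d s).2 := by
  intro f
  induction f with
  | zero => intro x d s y h1 h2 h3; exact ⟨h1, h2, h3⟩
  | succ f ih =>
    intro x d s y h1 h2 h3
    by_cases h : d * 2 ≤ x
    · simp only [dblLoop, if_pos h]
      exact ih x (d * 2) (s * 2) y (by rw [h1]; ring) h (by omega)
    · simp only [dblLoop, if_neg h]
      exact ⟨h1, h2, h3⟩

-- adding s·y to the dividend adds s to the Euclidean quotient sum (r ≥ 0, y ≥ 1, s ≥ 0)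
theorem euclid_qshift (f g : Nat) (r s y c : Int) (hy : 0 < y) (_hr : 0 ≤ r) (_hs : 0 ≤ s)
    (hf : y.toNat < f) (hg : y.toNat < g) :
    euclidLoop f (r + s * y) y c = ((euclidLoop g r y c).1, (euclidLoop g r y c).2 + s) := by
  obtain ⟨f', rfl⟩ : ∃ f', f = f' + 1 := ⟨f - 1, by omega⟩
  obtain ⟨g', rfl⟩ : ∃ g', g = g' + 1 := ⟨g - 1, by omega⟩
  rw [euclid_step f' (r + s * y) y c hy, euclid_step g' r y c hy]
  have hmod : PySem.Int.mod (r + s * y) y = PySem.Int.mod r y := by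
    rw [PySem.Int.mod_eq_emod_of_pos hy, PySem.Int.mod_eq_emod_of_pos hy]
    exact Int.add_mul_emod_self_right r s y
  have hdiv : PySem.Int.floordiv (r + s * y) y = PySem.Int.floordiv r y + s := by
    rw [PySem.Int.floordiv_eq_ediv_of_pos hy, PySem.Int.floordiv_eq_ediv_of_pos hy]
    rw [Int.add_mul_ediv_right r s (by omega)]
  rw [hmod, hdiv]
  have hb0 := PySem.Int.mod_nonneg r hy
  have hb1 := PySem.Int.mod_lt r hy
  rw [show c + (PySem.Int.floordiv r y + s) = (c + PySem.Int.floordiv r y) + s by ring]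
  rw [euclid_shift f' y (PySem.Int.mod r y) (c + PySem.Int.floordiv r y) s]
  rw [euclid_irrel f' g' y (PySem.Int.mod r y) (c + PySem.Int.floordiv r y)
    (by omega) (by omega)]

-- B's outer loop computes (0, gcd, c + full Euclidean quotient sum)
theorem outer_main : ∀ (n f e : Nat) (x y c : Int), 1 ≤ x → 1 ≤ y →
    (x + y).toNat ≤ n → (x + y).toNat < f → (x + y).toNat < e →
    outerLoop f x y c = (0, (euclidLoop e x y 0).1, c + (euclidLoop e x y 0).2) := by
  intro n
  induction n with
  | zero => intro f e x y c hx hy hn _ _; omega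
  | succ n ih =>
    intro f e x y c hx hy hn hf he
    obtain ⟨f', rfl⟩ : ∃ f', f = f' + 1 := ⟨f - 1, by omega⟩
    -- take the step of outerLoop
    have hguard : 0 < x ∧ 0 < y := ⟨by omega, by omega⟩
    -- name the swapped pair
    set X : Int := if x < y then y else x with hX
    set Y : Int := if x < y then x else y with hY
    have hstep : outerLoop (f' + 1) x y c =
        outerLoop f' (X - (dblLoop (X.toNat + 1) X Y 1).1) Y
          (c + (dblLoop (X.toNat + 1) X Y 1).2) := by
      simp only [outerLoop, if_pos hguard]
      by_cases hxy : x < y <;> simp [hX, hY, hxy]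
    have hYX : Y ≤ X := by by_cases hxy : x < y <;> simp [hY, hxy] <;> omega
    have hY1 : 1 ≤ Y := by by_cases hxy : x < y <;> simp [hY, hxy] <;> omega
    obtain ⟨hd1, hd2, hd3⟩ := dbl_inv (X.toNat + 1) X Y 1 Y (by ring) hYX le_rfl
    set d : Int := (dblLoop (X.toNat + 1) X Y 1).1 with hdd
    set s : Int := (dblLoop (X.toNat + 1) X Y 1).2 with hss
    have hdY : Y ≤ d := by nlinarith
    -- relate euclidLoop on (x,y) to euclidLoop on (X,Y)
    have hswap : ∀ (m : Nat), Y.toNat < m → X.toNat < m →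
        euclidLoop m x y 0 = euclidLoop m X Y 0 := by
      intro m hm1 hm2
      have hxX : x ≤ X ∧ y ≤ X := by simp only [hX]; split <;> omega
      have hxm : x.toNat < m := by omega
      have hym : y.toNat < m := by omega
      by_cases hxy : x < y
      · simp only [hX, hY, if_pos hxy]
        exact euclid_symm m m x y 0 (by omega) (by omega) hym hxm
      · simp only [hX, hY, if_neg hxy]
    -- euclidLoop on (X,Y) via the quotient-shift, X = (X - d) + s*Y
    have hXd : X = (X - d) + s * Y := by rw [← hd1]; ring
    by_cases hz : X - d = 0
    · -- next iteration exits: x-coordinate hit 0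
      have hdone : outerLoop f' (X - d) Y (c + s) = (0, Y, c + s) := by
        obtain ⟨f'', rfl⟩ : ∃ f'', f' = f'' + 1 := ⟨f' - 1, by omega⟩
        simp only [outerLoop]
        rw [if_neg (by omega)]
        rw [hz]
      rw [hstep, hdone]
      -- euclidLoop e x y 0 = (Y, s)
      have h1 : euclidLoop e x y 0 = (Y, s) := by
        rw [hswap e (by omega) (by omega)]
        have : euclidLoop e X Y 0 = euclidLoop e ((X - d) + s * Y) Y 0 := by rw [← hXd]
        rw [this, hz]
        rw [euclid_qshift e (Y.toNat + 1) 0 s Y 0 (by omega) le_rfl (by omega)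
          (by omega) (by omega)]
        obtain ⟨g', hg'⟩ : ∃ g', Y.toNat + 1 = g' + 1 := ⟨Y.toNat, rfl⟩
        rw [hg', euclid_step g' 0 Y 0 (by omega), mod_small le_rfl (by omega),
          fd_small le_rfl (by omega), euclid_zero]
        simp
      rw [h1]
    · -- loop continues: apply the induction hypothesis at (X - d, Y)
      have hz1 : 1 ≤ X - d := by omega
      have hsum : X + Y = x + y := by simp only [hX, hY]; split <;> omega
      have h1d : 1 ≤ d := by omega
      have hdec : ((X - d) + Y).toNat ≤ n := by omega
      rw [hstep]
      rw [ih f' (((X - d) + Y).toNat + 1) (X - d) Y (c + s) hz1 hY1 hdec (by omega)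
        (by omega)]
      have h2 : euclidLoop e x y 0 =
          ((euclidLoop (((X - d) + Y).toNat + 1) (X - d) Y 0).1,
           (euclidLoop (((X - d) + Y).toNat + 1) (X - d) Y 0).2 + s) := by
        rw [hswap e (by omega) (by omega)]
        have : euclidLoop e X Y 0 = euclidLoop e ((X - d) + s * Y) Y 0 := by rw [← hXd]
        rw [this]
        exact euclid_qshift e (((X - d) + Y).toNat + 1) (X - d) s Y 0 (by omega)
          (by omega) (by omega) (by omega) (by omega)
      rw [h2]
      simp only [Prod.mk.injEq]
      exact ⟨trivial, trivial, by ring⟩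

-- ===== VERDICT (by name: the statement is the Claim_ definition above) =====
theorem solution_spec : Claim_equal_solution := by
  unfold Claim_equal_solution Spec_solution
  intro x y _
  unfold solution solution_alt
  by_cases h : x < 1 ∨ y < 1
  · have h11 : ¬ (x = 1 ∧ y = 1) := by omega
    rw [sol_imp ((x + y).toNat) x y 0 h11 h]
    simp only [if_pos h]
  · simp only [if_neg h]
    rw [main_lemma (x + y).toNat ((x + y).toNat + 1) ((x + y).toNat + 1) x y 0 le_rfl
      (by omega) (by omega) (Or.inl ⟨by omega, by omega⟩)]
    rw [outer_main (x + y).toNat ((x + y).toNat + 1) ((x + y).toNat + 1) x y 0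
      (by omega) (by omega) le_rfl (by omega) (by omega)]
    by_cases hg : (euclidLoop ((x + y).toNat + 1) x y 0).1 = 1
    · rw [if_pos hg, if_pos (by simpa using hg)]
    · rw [if_neg hg, if_neg (by simpa using hg)]
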